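-- pv_equiv track=rewrite | github.com/DominikBobos/VUT-FIT-Excel-Fit-2022 | scripts/evaluateClustering.py | AddLabelsToFiles
-- ===== SOURCE A (Python) =====
-- def AddLabelsToFiles(cluster_list_true, cluster_list_pred, id_dict_true, id_dict_pred, id_labels):
-- 	"""
-- 	label files from clusters by integer IDs
-- 	:param cluster_list_true: reference clusters
-- 	:param cluster_list_pred: predicted clusters
-- 	:param id_dict_true: dict of real ID classes of the reference cluster
-- 	:param id_dict_pred: dict of predicted ID classes of the predicted cluster
-- 	:param id_labels: mapping dictionary to real labels to their integer version
-- 	:return: list of reference(true) labels and predicted labels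
-- 	"""
-- 	true_labels = []
-- 	pred_labels = []
-- 	file_dict = {}
-- 	for idx, cluster in enumerate(cluster_list_true):
-- 		for cluster_item in cluster:
-- 			integer_label = id_labels[id_dict_true[idx]]
-- 			file_dict[cluster_item[0].split('/')[-1]] = [integer_label]
-- 	for idx, cluster in enumerate(cluster_list_pred):
-- 		for cluster_item in cluster:
-- 			try:
-- 				integer_label = id_labels[id_dict_pred[idx]]
-- 				file_dict[cluster_item[0].split('/')[-1]].append(integer_label)
-- 			except KeyError:
-- 				pass # having something more
-- 	for filename, label in file_dict.items():
-- 		if len(label) == 2: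
-- 			true_labels.append(label[0])
-- 			pred_labels.append(label[1])
-- 	return true_labels, pred_labels
-- ===== SOURCE B (Python) =====
-- def AddLabelsToFiles(cluster_list_true, cluster_list_pred, id_dict_true, id_dict_pred, id_labels):
-- 	# B: two plain dict assignments replaced by a true-label dict plus a flat
-- 	# (filename, predicted-label) pair list; the join filters that list per
-- 	# filename instead of appending into list-valued dict entries.
-- 	true_map = {}
-- 	for idx, cluster in enumerate(cluster_list_true):
-- 		for cluster_item in cluster:
-- 			true_map[cluster_item[0].split('/')[-1]] = id_labels[id_dict_true[idx]]
-- 	pred_pairs = [(cluster_item[0].split('/')[-1], id_labels[id_dict_pred[idx]])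
-- 	              for idx, cluster in enumerate(cluster_list_pred)
-- 	              if id_dict_pred.get(idx) in id_labels
-- 	              for cluster_item in cluster]
-- 	pairs = []
-- 	for filename, true_label in true_map.items():
-- 		preds = [label for name, label in pred_pairs if name == filename]
-- 		if len(preds) == 1:
-- 			pairs.append((true_label, preds[0]))
-- 	return [p[0] for p in pairs], [p[1] for p in pairs]
-- ===== Notes on version B (the rewrite author's own statement) =====
-- stated objective: alternative
-- what changed: A's single list-valued file_dict (seeded with singleton true labels, appended to under try/except, then filtered by len==2) is replaced by a true-label dict plus a flat (filename, predicted-label) pair list built by a comprehension; the result is joined by filtering that pair list per filename and keeping filenames with exactly one predicted pair.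
import Mathlib
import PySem

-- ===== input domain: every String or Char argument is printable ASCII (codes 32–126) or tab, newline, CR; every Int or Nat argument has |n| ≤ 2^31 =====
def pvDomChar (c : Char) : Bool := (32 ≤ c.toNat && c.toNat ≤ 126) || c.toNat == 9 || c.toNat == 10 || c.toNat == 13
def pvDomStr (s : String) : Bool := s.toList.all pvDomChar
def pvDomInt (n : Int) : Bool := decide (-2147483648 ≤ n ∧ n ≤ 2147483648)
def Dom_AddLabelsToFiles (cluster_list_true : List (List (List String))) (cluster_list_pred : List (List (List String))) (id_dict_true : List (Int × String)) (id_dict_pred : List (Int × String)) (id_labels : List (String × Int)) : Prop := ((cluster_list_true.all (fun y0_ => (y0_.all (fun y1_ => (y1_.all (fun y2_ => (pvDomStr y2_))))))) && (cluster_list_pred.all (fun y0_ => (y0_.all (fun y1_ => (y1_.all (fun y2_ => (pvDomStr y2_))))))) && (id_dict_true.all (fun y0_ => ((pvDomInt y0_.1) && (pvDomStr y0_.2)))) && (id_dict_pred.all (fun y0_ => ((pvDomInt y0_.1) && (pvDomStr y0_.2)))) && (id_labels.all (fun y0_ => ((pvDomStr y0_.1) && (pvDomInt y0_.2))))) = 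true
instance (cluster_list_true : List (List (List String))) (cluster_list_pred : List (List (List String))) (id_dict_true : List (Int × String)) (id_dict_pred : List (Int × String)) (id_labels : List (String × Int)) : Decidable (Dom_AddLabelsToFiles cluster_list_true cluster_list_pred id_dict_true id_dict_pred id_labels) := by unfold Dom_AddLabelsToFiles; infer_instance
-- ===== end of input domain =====

-- B replaces A's single list-valued file dict by a true-label dict plus a flat (filename, predicted
-- label) pair list joined per filename (objective: alternative data structure, same observable result).

-- shared helpers: the filename key 'cluster_item[0].split('/')[-1]' and the Python expression
-- 'id_labels[id_dict[idx]]' as an Option (none = KeyError; split('/') never returns an empty list,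
-- so the getD/getLastD defaults are never used)
def pvFileKey (s : String) : String := ((PySem.Str.split? s "/").getD []).getLastD ""
def pvLook (dct : List (Int × String)) (lbls : List (String × Int)) (i : Int) : Option Int :=
  (PySem.Dict.get? (PySem.Dict.mk dct) i).bind (fun s => PySem.Dict.get? (PySem.Dict.mk lbls) s)

-- ===== PORT A =====
-- body of A's first loop: 'file_dict[cluster_item[0].split('/')[-1]] = [integer_label]'
-- (lo = the label lookup; none = uncaught KeyError, outside Pre_; pyGet? none = IndexError, outside Pre_)
def pvStep1A (lo : Option Int) (d : PySem.Dict String (List Int)) (item : List String) : PySem.Dict String (List Int) :=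
  match lo with
  | none => d
  | some lbl =>
    match PySem.List.pyGet? item 0 with
    | none => d
    | some f0 => d.insert (pvFileKey f0) [lbl]

-- 'file_dict[key].append(integer_label)' with the KeyError on a missing key caught: pass
def pvStep2A (d : PySem.Dict String (List Int)) (k : String) (lbl : Int) : PySem.Dict String (List Int) :=
  match d.get? k with
  | none => d
  | some cur => d.insert k (cur ++ [lbl])

-- body of A's second loop (lo none = KeyError caught by the except: pass)
def pvStep2 (lo : Option Int) (d : PySem.Dict String (List Int)) (item : List String) : PySem.Dict String (List Int) :=
  match lo with
  | none => d
  | some lbl =>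
    match PySem.List.pyGet? item 0 with
    | none => d
    | some f0 => pvStep2A d (pvFileKey f0) lbl

def AddLabelsToFiles (cluster_list_true : List (List (List String))) (cluster_list_pred : List (List (List String))) (id_dict_true : List (Int × String)) (id_dict_pred : List (Int × String)) (id_labels : List (String × Int)) : List Int × List Int :=
  let file_dict : PySem.Dict String (List Int) :=
    (PySem.List.enumerate cluster_list_true 0).foldl
      (fun d p => p.2.foldl (pvStep1A (pvLook id_dict_true id_labels p.1)) d) PySem.Dict.empty
  let file_dict2 : PySem.Dict String (List Int) :=
    (PySem.List.enumerate cluster_list_pred 0).foldl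
      (fun d p => p.2.foldl (pvStep2 (pvLook id_dict_pred id_labels p.1)) d) file_dict
  file_dict2.items.foldl (fun acc q =>
    if q.2.length = 2 then (acc.1 ++ [q.2.getD 0 0], acc.2 ++ [q.2.getD 1 0]) else acc) ([], [])

-- ===== PORT B =====
-- body of B's first loop: 'true_map[cluster_item[0].split('/')[-1]] = id_labels[id_dict_true[idx]]'
def pvStep1B (lo : Option Int) (d : PySem.Dict String Int) (item : List String) : PySem.Dict String Int :=
  match lo with
  | none => d
  | some lbl =>
    match PySem.List.pyGet? item 0 with
    | none => d
    | some f0 => d.insert (pvFileKey f0) lbl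

-- B's pred_pairs comprehension: all (filename key, predicted label) pairs, clusters whose
-- label lookup fails skipped by the 'if' guard
def pvEvents (look : Int → Option Int) (outer : List (Int × List (List String))) : List (String × Int) :=
  outer.flatMap (fun p =>
    match look p.1 with
    | none => []
    | some lbl => p.2.filterMap (fun item =>
        (PySem.List.pyGet? item 0).map (fun f0 => (pvFileKey f0, lbl))))

def AddLabelsToFiles_alt (cluster_list_true : List (List (List String))) (cluster_list_pred : List (List (List String))) (id_dict_true : List (Int × String)) (id_dict_pred : List (Int × String)) (id_labels : List (String × Int)) : List Int × List Int :=
  let true_map : PySem.Dict String Int :=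
    (PySem.List.enumerate cluster_list_true 0).foldl
      (fun d p => p.2.foldl (pvStep1B (pvLook id_dict_true id_labels p.1)) d) PySem.Dict.empty
  let pred_pairs : List (String × Int) :=
    pvEvents (pvLook id_dict_pred id_labels) (PySem.List.enumerate cluster_list_pred 0)
  let pairs : List (Int × Int) :=
    true_map.items.foldl (fun pairs q =>
      let preds := (pred_pairs.filter (fun r => r.1 == q.1)).map (·.2)
      if preds.length = 1 then pairs ++ [(q.2, preds.getD 0 0)] else pairs) []
  (pairs.map (·.1), pairs.map (·.2))

-- ===== PRECONDITION & SPEC =====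
-- Pre_ excludes exactly the inputs where Python A raises: in the first loop an uncaught KeyError
-- (missing id_dict_true/id_labels key for a nonempty cluster) or IndexError (an empty cluster_item);
-- in the second loop an uncaught IndexError (an empty cluster_item reached after the label lookups
-- succeed — the except clause only catches KeyError).
def Pre_AddLabelsToFiles (cluster_list_true : List (List (List String))) (cluster_list_pred : List (List (List String))) (id_dict_true : List (Int × String)) (id_dict_pred : List (Int × String)) (id_labels : List (String × Int)) : Prop :=
  (∀ p ∈ PySem.List.enumerate cluster_list_true 0, p.2 ≠ [] →
      (pvLook id_dict_true id_labels p.1).isSome ∧ ∀ item ∈ p.2, item ≠ []) ∧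
  (∀ p ∈ PySem.List.enumerate cluster_list_pred 0,
      (pvLook id_dict_pred id_labels p.1).isSome → ∀ item ∈ p.2, item ≠ [])
instance (cluster_list_true : List (List (List String))) (cluster_list_pred : List (List (List String))) (id_dict_true : List (Int × String)) (id_dict_pred : List (Int × String)) (id_labels : List (String × Int)) : Decidable (Pre_AddLabelsToFiles cluster_list_true cluster_list_pred id_dict_true id_dict_pred id_labels) := by unfold Pre_AddLabelsToFiles; infer_instance

def pvWitness_AddLabelsToFiles : List (List (List String)) × List (List (List String)) × (List (Int × String)) × (List (Int × String)) × (List (String × Int)) :=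
  ([[["data/a.wav"], ["b.wav"]], [["data/b.wav"]]],
   [[["data/a.wav"]], [["c.wav"]]],
   [(0, "p"), (1, "q")],
   [(0, "p"), (1, "r")],
   [("p", 3), ("q", 5)])

def Spec_AddLabelsToFiles (cluster_list_true : List (List (List String))) (cluster_list_pred : List (List (List String))) (id_dict_true : List (Int × String)) (id_dict_pred : List (Int × String)) (id_labels : List (String × Int)) (out : List Int × List Int) : Prop := out = AddLabelsToFiles_alt cluster_list_true cluster_list_pred id_dict_true id_dict_pred id_labels
instance (cluster_list_true : List (List (List String))) (cluster_list_pred : List (List (List String))) (id_dict_true : List (Int × String)) (id_dict_pred : List (Int × String)) (id_labels : List (String × Int)) (out : List Int × List Int) : Decidable (Spec_AddLabelsToFiles cluster_list_true cluster_list_pred id_dict_true id_dict_pred id_labels out) := by unfold Spec_AddLabelsToFiles; infer_instance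

-- ===== CLAIM (what is proved, stated in full; the proofs are below) =====
def Claim_equal_AddLabelsToFiles : Prop := ∀ (cluster_list_true : List (List (List String))) (cluster_list_pred : List (List (List String))) (id_dict_true : List (Int × String)) (id_dict_pred : List (Int × String)) (id_labels : List (String × Int)), Dom_AddLabelsToFiles cluster_list_true cluster_list_pred id_dict_true id_dict_pred id_labels → Pre_AddLabelsToFiles cluster_list_true cluster_list_pred id_dict_true id_dict_pred id_labels → Spec_AddLabelsToFiles cluster_list_true cluster_list_pred id_dict_true id_dict_pred id_labels (AddLabelsToFiles cluster_list_true cluster_list_pred id_dict_true id_dict_pred id_labels)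

-- ===== LEMMAS AND PROOFS =====

-- value-map of a dict: each value v becomes the singleton list [v]
def pvMapl (l : List (String × Int)) : List (String × List Int) := l.map (fun q => (q.1, [q.2]))
def pvMapd (tm : PySem.Dict String Int) : PySem.Dict String (List Int) := PySem.Dict.mk (pvMapl tm.items)

lemma pv_get?_mapl (l : List (String × Int)) (k : String) :
    (PySem.Dict.mk (pvMapl l)).get? k = ((PySem.Dict.mk l).get? k).map (fun v => [v]) := by
  induction l with
  | nil => rfl
  | cons q t ih =>
    simp only [pvMapl, List.map_cons] at *
    rw [PySem.Dict.get?_mk_cons, PySem.Dict.get?_mk_cons]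
    by_cases h : q.1 == k <;> simp [h, ih]

lemma pv_mapd_insert (tm : PySem.Dict String Int) (k : String) (v : Int) :
    (pvMapd tm).insert k [v] = pvMapd (tm.insert k v) := by
  have hc : (pvMapd tm).contains k = tm.contains k := by
    rw [PySem.Dict.contains_eq_isSome_get?, PySem.Dict.contains_eq_isSome_get?]
    show ((PySem.Dict.mk (pvMapl tm.items)).get? k).isSome = _
    rw [pv_get?_mapl]
    cases (PySem.Dict.mk tm.items).get? k <;> rfl
  apply PySem.Dict.ext
  rw [PySem.Dict.items_insert, hc]
  show _ = pvMapl ((tm.insert k v).items)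
  rw [PySem.Dict.items_insert]
  by_cases h : tm.contains k = true
  · simp only [h, if_pos]
    show (pvMapl tm.items).map _ = pvMapl (tm.items.map _)
    simp only [pvMapl, List.map_map]
    apply List.map_congr_left
    intro q _
    by_cases hq : q.1 = k <;> simp [hq]
  · simp only [h, if_neg, Bool.false_eq_true, not_false_iff]
    show pvMapl tm.items ++ [(k, [v])] = pvMapl (tm.items ++ [(k, v)])
    simp [pvMapl]

-- the first loops of A and B build the same dict up to pvMapd
lemma pv_sim1_inner (lo : Option Int) (items : List (List String)) :
    ∀ tm : PySem.Dict String Int,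
      items.foldl (pvStep1A lo) (pvMapd tm) = pvMapd (items.foldl (pvStep1B lo) tm) := by
  cases lo with
  | none =>
    intro tm
    induction items with
    | nil => rfl
    | cons it t ih => simpa [pvStep1A, pvStep1B] using ih
  | some lbl =>
    induction items with
    | nil => intro tm; rfl
    | cons it t ih =>
      intro tm
      simp only [List.foldl_cons, pvStep1A, pvStep1B]
      cases h : PySem.List.pyGet? it 0 with
      | none => exact ih tm
      | some f0 => dsimp only; rw [pv_mapd_insert]; exact ih _

lemma pv_sim1 (look : Int → Option Int) (outer : List (Int × List (List String))) :
    ∀ tm : PySem.Dict String Int,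
      outer.foldl (fun d p => p.2.foldl (pvStep1A (look p.1)) d) (pvMapd tm)
      = pvMapd (outer.foldl (fun d p => p.2.foldl (pvStep1B (look p.1)) d) tm) := by
  induction outer with
  | nil => intro tm; rfl
  | cons p t ih =>
    intro tm
    simp only [List.foldl_cons]
    rw [pv_sim1_inner (look p.1) p.2 tm]
    exact ih _

-- the second loop of A is the fold of pvStep2A over the flat event list
lemma pv_loop2_inner (lo : Option Int) (items : List (List String)) :
    ∀ d : PySem.Dict String (List Int),
      items.foldl (pvStep2 lo) d
      = ((match lo with
         | none => ([] : List (String × Int))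
         | some lbl => items.filterMap (fun item =>
             (PySem.List.pyGet? item 0).map (fun f0 => (pvFileKey f0, lbl)))) :
         List (String × Int)).foldl
          (fun (d : PySem.Dict String (List Int)) (e : String × Int) => pvStep2A d e.1 e.2) d := by
  cases lo with
  | none =>
    intro d
    induction items with
    | nil => rfl
    | cons it t ih => simpa [pvStep2] using ih
  | some lbl =>
    induction items with
    | nil => intro d; rfl
    | cons it t ih =>
      intro d
      simp only [List.foldl_cons, List.filterMap_cons, pvStep2]
      cases h : PySem.List.pyGet? it 0 with
      | none => exact ih d
      | some f0 => simp only [Option.map_some, List.foldl_cons]; exact ih _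

lemma pv_loop2_events (look : Int → Option Int) (outer : List (Int × List (List String))) :
    ∀ d : PySem.Dict String (List Int),
      outer.foldl (fun d p => p.2.foldl (pvStep2 (look p.1)) d) d
      = (pvEvents look outer).foldl (fun d e => pvStep2A d e.1 e.2) d := by
  induction outer with
  | nil => intro d; rfl
  | cons p t ih =>
    intro d
    simp only [List.foldl_cons, pvEvents, List.flatMap_cons, List.foldl_append]
    rw [pv_loop2_inner (look p.1) p.2 d, ih]
    cases h : look p.1 <;> simp [pvEvents]

lemma pv_step2_keys (E : List (String × Int)) :
    ∀ d : PySem.Dict String (List Int),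
      (E.foldl (fun d e => pvStep2A d e.1 e.2) d).keys = d.keys := by
  induction E with
  | nil => intro d; rfl
  | cons e t ih =>
    intro d
    simp only [List.foldl_cons]
    rw [ih]
    show (pvStep2A d e.1 e.2).keys = d.keys
    unfold pvStep2A
    cases h : d.get? e.1 with
    | none => rfl
    | some cur =>
      apply PySem.Dict.keys_insert_of_contains
      rw [PySem.Dict.contains_eq_isSome_get?, h]
      rfl

lemma pv_step2_getD (E : List (String × Int)) :
    ∀ (d : PySem.Dict String (List Int)) (f : String),
      (E.foldl (fun d e => pvStep2A d e.1 e.2) d).getD f []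
      = d.getD f [] ++ (if (d.get? f).isSome then (E.filter (fun e => e.1 == f)).map (·.2) else []) := by
  induction E with
  | nil => intro d f; cases h : d.get? f <;> simp
  | cons e t ih =>
    intro d f
    simp only [List.foldl_cons, List.filter_cons]
    by_cases hef : e.1 = f
    · subst hef
      cases h : d.get? e.1 with
      | none =>
        have hd : pvStep2A d e.1 e.2 = d := by unfold pvStep2A; rw [h]
        rw [hd, ih, h]
        simp
      | some cur =>
        have hd : pvStep2A d e.1 e.2 = d.insert e.1 (cur ++ [e.2]) := by unfold pvStep2A; rw [h]
        rw [hd, ih, PySem.Dict.get?_insert_self, PySem.Dict.getD_insert_self,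
          PySem.Dict.getD_eq_get?_getD, h]
        simp
    · have hne : (e.1 == f) = false := by simp [hef]
      rw [ih]
      have h1 : (pvStep2A d e.1 e.2).getD f [] = d.getD f [] := by
        unfold pvStep2A
        cases h : d.get? e.1 with
        | none => rfl
        | some cur =>
          dsimp only
          rw [PySem.Dict.getD_eq_get?_getD, PySem.Dict.get?_insert_of_ne _ _ (Ne.symm hef), ← PySem.Dict.getD_eq_get?_getD]
      have h2 : (pvStep2A d e.1 e.2).get? f = d.get? f := by
        unfold pvStep2A
        cases h : d.get? e.1 with
        | none => rfl
        | some cur => dsimp only; rw [PySem.Dict.get?_insert_of_ne _ _ (Ne.symm hef)]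
      rw [h1, h2, hne]
      simp

-- keys stay Nodup through B's first loop
lemma pv_loop1_nodup (look : Int → Option Int) (outer : List (Int × List (List String))) :
    ∀ tm : PySem.Dict String Int, tm.keys.Nodup →
      (outer.foldl (fun d p => p.2.foldl (pvStep1B (look p.1)) d) tm).keys.Nodup := by
  have inner : ∀ (lo : Option Int) (items : List (List String)) (tm : PySem.Dict String Int),
      tm.keys.Nodup → (items.foldl (pvStep1B lo) tm).keys.Nodup := by
    intro lo items
    induction items with
    | nil => intro tm h; exact h
    | cons it t ih =>
      intro tm h
      simp only [List.foldl_cons]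
      apply ih
      unfold pvStep1B
      cases lo with
      | none => exact h
      | some lbl =>
        cases PySem.List.pyGet? it 0 with
        | none => exact h
        | some f0 => exact PySem.Dict.nodup_keys_insert _ _ _ h
  induction outer with
  | nil => intro tm h; exact h
  | cons p t ih =>
    intro tm h
    simp only [List.foldl_cons]
    exact ih _ (inner _ _ _ h)

-- the dict after A's second loop, item by item
lemma pv_d2_items (tm : PySem.Dict String Int) (htm : tm.keys.Nodup) (E : List (String × Int)) :
    (E.foldl (fun d e => pvStep2A d e.1 e.2) (pvMapd tm)).items
    = tm.items.map (fun q => (q.1, q.2 :: (E.filter (fun e => e.1 == q.1)).map (·.2))) := by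
  set F := E.foldl (fun d e => pvStep2A d e.1 e.2) (pvMapd tm) with hF
  have hkeysM : (pvMapd tm).keys = tm.keys := by
    show (pvMapl tm.items).map (·.1) = tm.items.map (·.1)
    simp [pvMapl]
  have hkeys : F.keys = tm.keys := by rw [hF, pv_step2_keys, hkeysM]
  have hnodupF : F.keys.Nodup := by rw [hkeys]; exact htm
  have hid : F.items.map (fun q => (q.1, F.getD q.1 [])) = F.items := by
    have hq : ∀ q ∈ F.items, (fun (q : String × List Int) => (q.1, F.getD q.1 [])) q = id q := by
      intro q hq
      obtain ⟨k, v⟩ := q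
      simp only [id]
      rw [PySem.Dict.getD_of_mem_items _ hq hnodupF]
    rw [List.map_congr_left hq, List.map_id]
  have hkeysitems : F.items.map (·.1) = tm.items.map (·.1) := hkeys
  calc F.items = F.items.map (fun q => (q.1, F.getD q.1 [])) := hid.symm
    _ = (F.items.map (·.1)).map (fun k => (k, F.getD k [])) := by rw [List.map_map]; rfl
    _ = (tm.items.map (·.1)).map (fun k => (k, F.getD k [])) := by rw [hkeysitems]
    _ = tm.items.map (fun q => (q.1, F.getD q.1 [])) := by rw [List.map_map]; rfl
    _ = tm.items.map (fun q => (q.1, q.2 :: (E.filter (fun e => e.1 == q.1)).map (·.2))) := by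
        apply List.map_congr_left
        intro q hq
        have hget : (pvMapd tm).get? q.1 = some [q.2] := by
          show (PySem.Dict.mk (pvMapl tm.items)).get? q.1 = some [q.2]
          rw [pv_get?_mapl]
          have : tm.get? q.1 = some q.2 := (PySem.Dict.get?_eq_some_iff_mem_items _ _ _ htm).2 hq
          rw [this]
          rfl
        have hgetD : (pvMapd tm).getD q.1 [] = [q.2] := PySem.Dict.getD_of_get?_eq_some _ _ hget
        rw [hF, pv_step2_getD, hgetD, hget]
        simp

-- A's final pass over the joined items equals B's pair-list pass followed by the two projections
lemma pv_final (E : List (String × Int)) (l : List (String × Int)) :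
    ∀ acc : List (Int × Int),
      l.foldl (fun x y =>
          if (y.2 :: (E.filter (fun e => e.1 == y.1)).map (·.2)).length = 2 then
            (x.1 ++ [(y.2 :: (E.filter (fun e => e.1 == y.1)).map (·.2)).getD 0 0],
             x.2 ++ [(y.2 :: (E.filter (fun e => e.1 == y.1)).map (·.2)).getD 1 0])
          else x)
        (acc.map (·.1), acc.map (·.2))
      = ((l.foldl (fun pairs q =>
            if ((E.filter (fun r => r.1 == q.1)).map (·.2)).length = 1 then
              pairs ++ [(q.2, ((E.filter (fun r => r.1 == q.1)).map (·.2)).getD 0 0)]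
            else pairs) acc).map (·.1),
         (l.foldl (fun pairs q =>
            if ((E.filter (fun r => r.1 == q.1)).map (·.2)).length = 1 then
              pairs ++ [(q.2, ((E.filter (fun r => r.1 == q.1)).map (·.2)).getD 0 0)]
            else pairs) acc).map (·.2)) := by
  induction l with
  | nil => intro acc; rfl
  | cons q t ih =>
    intro acc
    simp only [List.foldl_cons, List.length_cons]
    by_cases h : ((E.filter (fun r => r.1 == q.1)).map (·.2)).length = 1
    · simp only [h, if_pos]
      have := ih (acc ++ [(q.2, ((E.filter (fun r => r.1 == q.1)).map (·.2)).getD 0 0)])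
      simpa using this
    · have h2 : ¬ ((E.filter (fun e => e.1 == q.1)).map (·.2)).length + 1 = 2 := by omega
      simp only [h, h2, if_neg, not_false_iff]
      exact ih acc

-- ===== VERDICT (by name: the statement is the Claim_ definition above) =====
theorem AddLabelsToFiles_spec : Claim_equal_AddLabelsToFiles := by
  unfold Claim_equal_AddLabelsToFiles
  intro clt clp idt idp lbls _ _
  unfold Spec_AddLabelsToFiles
  simp only [AddLabelsToFiles, AddLabelsToFiles_alt]
  rw [show (PySem.Dict.empty : PySem.Dict String (List Int)) = pvMapd PySem.Dict.empty from rfl,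
    pv_sim1, pv_loop2_events, pv_d2_items]
  case htm =>
    apply pv_loop1_nodup
    exact List.nodup_nil
  set tm := (PySem.List.enumerate clt 0).foldl
      (fun d p => p.2.foldl (pvStep1B (pvLook idt lbls p.1)) d) PySem.Dict.empty with htm
  set E := pvEvents (pvLook idp lbls) (PySem.List.enumerate clp 0) with hE
  rw [List.foldl_map]
  dsimp only
  have := pv_final E tm.items []
  simpa using this
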